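-- pv_equiv track=rewrite | github.com/zakbasil/Algorithms | Python/Oppenheimer/Oppenheimer.py | calculate
-- ===== SOURCE A (Python) =====
-- def checkRange(targets, drops,radius):
--     lenDrops = len(drops)
--     for target in targets:
--         undestroyed = 0
--         for drop in drops:
--             if (abs(target - drop)>radius):
--                  undestroyed += 1
--             else:
--                 undestroyed -= 1
--         if undestroyed==lenDrops:
--             return(False)
--     return(True)
--
-- def calculate(targets, drops):
--     maxRad = 100000000
--     minRad = 0
--     lastTrueRadius = maxRad
--     while maxRad >= minRad:
--         mid = (minRad + maxRad)//2
--         if checkRange(targets, drops, mid):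
--             lastTrueRadius = mid
--             maxRad = mid - 1
--         else:
--             minRad = mid + 1
--     return(lastTrueRadius)
-- ===== SOURCE B (Python) =====
-- def calculate(targets, drops):
--     MAX_RADIUS = 100000000
--     if targets and not drops:
--         return MAX_RADIUS
--     need = max((min(abs(t - d) for d in drops) for t in targets), default=0)
--     return min(need, MAX_RADIUS)
-- ===== Notes on version B (the rewrite author's own statement) =====
-- stated objective: faster
-- what changed: Replaces A's binary search over the radius range [0,1e8] (re-scanning all target/drop pairs each probe) with a direct closed-form computation: the max over targets of the min distance to a drop, clamped to 1e8.
import Mathlib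
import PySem

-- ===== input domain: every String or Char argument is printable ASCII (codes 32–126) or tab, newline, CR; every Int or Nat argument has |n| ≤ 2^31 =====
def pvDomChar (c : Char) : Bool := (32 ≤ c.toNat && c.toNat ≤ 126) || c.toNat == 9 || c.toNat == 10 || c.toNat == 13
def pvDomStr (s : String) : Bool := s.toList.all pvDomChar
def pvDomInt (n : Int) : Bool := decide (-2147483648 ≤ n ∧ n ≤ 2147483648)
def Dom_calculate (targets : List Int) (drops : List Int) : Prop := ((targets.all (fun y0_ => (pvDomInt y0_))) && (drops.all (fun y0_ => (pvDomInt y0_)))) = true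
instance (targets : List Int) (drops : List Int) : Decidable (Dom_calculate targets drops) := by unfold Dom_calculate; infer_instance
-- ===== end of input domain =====

-- B replaces A's binary search over the answer by a direct closed-form max-of-min-distances computation (clamped to 1e8).

-- ===== PORT A =====
-- inner 'for drop in drops' loop of checkRange (the running 'undestroyed' counter)
def undestroyedCount (drops : List Int) (target radius : Int) : Int :=
  drops.foldl (fun u d => if |target - d| > radius then u + 1 else u - 1) 0

-- 'for target in targets' loop of checkRange
def checkRange (targets : List Int) (drops : List Int) (radius : Int) : Bool :=
  match targets with
  | [] => true
  | t :: ts =>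
      if undestroyedCount drops t radius = (drops.length : Int) then false
      else checkRange ts drops radius

-- the 'while maxRad >= minRad' binary-search loop of calculate; 'fuel' is only a structural
-- termination guard (the measure maxRad+1-minRad strictly decreases, so fuel = hi+1-lo suffices
-- and the guard never fires)
def calcLoop (targets : List Int) (drops : List Int) (fuel : Nat) (minRad maxRad lastTrue : Int) : Int :=
  match fuel with
  | 0 => lastTrue
  | fuel + 1 =>
    if maxRad ≥ minRad then
      let mid := PySem.Int.floordiv (minRad + maxRad) 2
      if checkRange targets drops mid then
        calcLoop targets drops fuel minRad (mid - 1) mid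
      else
        calcLoop targets drops fuel (mid + 1) maxRad lastTrue
    else lastTrue

def calculate (targets : List Int) (drops : List Int) : Int :=
  calcLoop targets drops 100000001 0 100000000 100000000

-- ===== PORT B =====
-- min(abs(t - d) for d in drops)
def minDist (t : Int) (drops : List Int) : Int :=
  (PySem.List.min? (drops.map (fun d => |t - d|)) (fun x => x)).getD 0

-- max((min(abs(t - d) for d in drops) for t in targets), default=0)
def needOf (targets drops : List Int) : Int :=
  (PySem.List.max? (targets.map (fun t => minDist t drops)) (fun x => x)).getD 0

def calculate_alt (targets : List Int) (drops : List Int) : Int :=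
  if targets ≠ [] ∧ drops = [] then 100000000
  else min (needOf targets drops) 100000000

-- ===== PRECONDITION & SPEC =====
def Spec_calculate (targets : List Int) (drops : List Int) (out : Int) : Prop := out = calculate_alt targets drops
instance (targets : List Int) (drops : List Int) (out : Int) : Decidable (Spec_calculate targets drops out) := by unfold Spec_calculate; infer_instance

-- ===== CLAIM (what is proved, stated in full; the proofs are below) =====
def Claim_equal_calculate : Prop := ∀ (targets : List Int) (drops : List Int), Dom_calculate targets drops → Spec_calculate targets drops (calculate targets drops)

-- ===== LEMMAS AND PROOFS =====

theorem foldl_count_shift (t r : Int) (l : List Int) (u : Int) :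
    l.foldl (fun u d => if |t - d| > r then u + 1 else u - 1) u
      = u + l.foldl (fun u d => if |t - d| > r then u + 1 else u - 1) 0 := by
  induction l generalizing u with
  | nil => simp
  | cons d ds ih =>
      simp only [List.foldl_cons]
      rw [ih, ih (if |t - d| > r then (0:Int) + 1 else 0 - 1)]
      split <;> ring

theorem undestroyedCount_cons (d : Int) (ds : List Int) (t r : Int) :
    undestroyedCount (d :: ds) t r
      = (if |t - d| > r then 1 else -1) + undestroyedCount ds t r := by
  unfold undestroyedCount
  rw [List.foldl_cons, foldl_count_shift]
  split <;> omega

theorem count_le_len (t r : Int) (l : List Int) :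
    undestroyedCount l t r ≤ (l.length : Int) := by
  induction l with
  | nil => simp [undestroyedCount]
  | cons d ds ih =>
      rw [undestroyedCount_cons]
      simp only [List.length_cons, Nat.cast_add, Nat.cast_one]
      split <;> omega

theorem count_eq_len_iff (t r : Int) (l : List Int) :
    undestroyedCount l t r = (l.length : Int) ↔ ∀ d ∈ l, |t - d| > r := by
  induction l with
  | nil => simp [undestroyedCount]
  | cons d ds ih =>
      have hle := count_le_len t r ds
      rw [undestroyedCount_cons]
      simp only [List.length_cons, Nat.cast_add, Nat.cast_one, List.forall_mem_cons]
      constructor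
      · intro h
        split at h
        · next hc =>
            refine ⟨hc, ih.mp ?_⟩
            omega
        · exfalso; omega
      · rintro ⟨hc, hrest⟩
        rw [if_pos hc]
        have := ih.mpr hrest
        omega

theorem checkRange_iff (targets drops : List Int) (r : Int) :
    checkRange targets drops r = true ↔ ∀ t ∈ targets, ¬ (∀ d ∈ drops, |t - d| > r) := by
  induction targets with
  | nil => simp [checkRange]
  | cons t ts ih =>
      simp only [checkRange]
      split
      · next h =>
          simp only [Bool.false_eq_true, false_iff, not_forall]
          exact ⟨t, by simp, by simpa using (count_eq_len_iff t r drops).mp h⟩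
      · next h =>
          rw [ih]
          simp only [List.forall_mem_cons]
          constructor
          · intro hall
            refine ⟨?_, hall⟩
            intro hf
            exact h ((count_eq_len_iff t r drops).mpr hf)
          · exact fun hp => hp.2

theorem checkRange_empty_drops (targets : List Int) (r : Int) (ht : targets ≠ []) :
    checkRange targets [] r = false := by
  cases targets with
  | nil => exact absurd rfl ht
  | cons t ts =>
      have : ¬ (checkRange (t :: ts) [] r = true) := by
        rw [checkRange_iff]
        intro h
        exact h t (by simp) (by simp)
      simpa using this

theorem minDist_nonneg (t : Int) (drops : List Int) : 0 ≤ minDist t drops := by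
  unfold minDist
  cases h : PySem.List.min? (drops.map (fun d => |t - d|)) (fun x => x) with
  | none => simp
  | some m =>
      have hm := PySem.List.min?_mem h
      rcases List.mem_map.mp hm with ⟨d, _, hd⟩
      simp only [Option.getD_some]
      rw [← hd]
      exact abs_nonneg _

theorem minDist_le_iff (t : Int) (drops : List Int) (r : Int) (hd : drops ≠ []) :
    minDist t drops ≤ r ↔ ∃ d ∈ drops, |t - d| ≤ r := by
  unfold minDist
  cases h : PySem.List.min? (drops.map (fun d => |t - d|)) (fun x => x) with
  | none =>
      rw [PySem.List.min?_eq_none_iff] at h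
      exact absurd (by simpa [List.map_eq_nil_iff] using h) hd
  | some m =>
      have hmin := PySem.List.min?_isMin h
      rcases List.mem_map.mp (PySem.List.min?_mem h) with ⟨d0, hd0, hd0e⟩
      simp only [Option.getD_some]
      constructor
      · intro hle; exact ⟨d0, hd0, by omega⟩
      · rintro ⟨d, hdm, hdle⟩
        have := hmin (|t - d|) (List.mem_map.mpr ⟨d, hdm, rfl⟩)
        simp only at this
        omega

theorem needOf_nonneg (targets drops : List Int) : 0 ≤ needOf targets drops := by
  unfold needOf
  cases h : PySem.List.max? (targets.map (fun t => minDist t drops)) (fun x => x) with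
  | none => simp
  | some m =>
      rcases List.mem_map.mp (PySem.List.max?_mem h) with ⟨t, _, ht⟩
      simp only [Option.getD_some]
      rw [← ht]
      exact minDist_nonneg t drops

theorem needOf_empty (drops : List Int) : needOf [] drops = 0 := by
  simp [needOf, PySem.List.max?]

theorem needOf_le_iff (targets drops : List Int) (r : Int) (hr : 0 ≤ r) :
    needOf targets drops ≤ r ↔ ∀ t ∈ targets, minDist t drops ≤ r := by
  unfold needOf
  cases h : PySem.List.max? (targets.map (fun t => minDist t drops)) (fun x => x) with
  | none =>
      rw [PySem.List.max?_eq_none_iff] at h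
      have := List.map_eq_nil_iff.mp h
      subst this; simpa using hr
  | some m =>
      have hmax := PySem.List.max?_isMax h
      rcases List.mem_map.mp (PySem.List.max?_mem h) with ⟨t0, ht0, ht0e⟩
      simp only [Option.getD_some]
      constructor
      · intro hle t ht
        have := hmax (minDist t drops) (List.mem_map.mpr ⟨t, ht, rfl⟩)
        simp only at this
        omega
      · intro hall
        have := hall t0 ht0
        omega

-- with a nonempty drops list, checkRange is exactly the threshold predicate 'needOf ≤ r'
theorem checkRange_char (targets drops : List Int) (r : Int) (hd : drops ≠ []) (hr : 0 ≤ r) :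
    checkRange targets drops r = decide (needOf targets drops ≤ r) := by
  have hiff : checkRange targets drops r = true ↔ needOf targets drops ≤ r := by
    rw [checkRange_iff, needOf_le_iff targets drops r hr]
    constructor
    · intro h t ht
      rw [minDist_le_iff t drops r hd]
      have := h t ht
      push Not at this
      rcases this with ⟨d, hdm, hdle⟩
      exact ⟨d, hdm, by omega⟩
    · intro h t ht hall
      rcases (minDist_le_iff t drops r hd).mp (h t ht) with ⟨d, hdm, hdle⟩
      have := hall d hdm
      omega
  by_cases h : needOf targets drops ≤ r
  · simp [h, hiff.mpr h]
  · simp only [h, decide_false]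
    cases hc : checkRange targets drops r
    · rfl
    · exact absurd (hiff.mp hc) h

-- the binary search converges to the threshold N of a monotone predicate
theorem calcLoop_finds (targets drops : List Int) (N : Int) :
    ∀ (k : Nat) (lo hi last : Int), (hi + 1 - lo).toNat ≤ k →
    0 ≤ lo → lo ≤ N → N ≤ last → last ≤ hi + 1 →
    (∀ r, 0 ≤ r → checkRange targets drops r = decide (N ≤ r)) →
    calcLoop targets drops k lo hi last = N := by
  intro k
  induction k with
  | zero =>
      intro lo hi last hk h0 hloN hNl hlh hchar
      show last = N
      omega
  | succ k ih =>
      intro lo hi last hk h0 hloN hNl hlh hchar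
      show (if hi ≥ lo then _ else last) = N
      by_cases hle : hi ≥ lo
      · rw [if_pos hle]
        show (if checkRange targets drops (PySem.Int.floordiv (lo + hi) 2) = true then
            calcLoop targets drops k lo (PySem.Int.floordiv (lo + hi) 2 - 1) (PySem.Int.floordiv (lo + hi) 2)
          else calcLoop targets drops k (PySem.Int.floordiv (lo + hi) 2 + 1) hi last) = N
        have hmid := PySem.Int.floordiv_two_mid_bounds (show lo ≤ hi by omega)
        set mid := PySem.Int.floordiv (lo + hi) 2 with hmiddef
        have hchk := hchar mid (by omega)
        by_cases hN : N ≤ mid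
        · simp only [hchk, hN, decide_true, if_true]
          exact ih lo (mid - 1) mid (by omega) h0 hloN hN (by omega) hchar
        · simp only [hchk, hN, decide_false, Bool.false_eq_true, if_false]
          exact ih (mid + 1) hi last (by omega) (by omega) (by omega) hNl hlh hchar
      · rw [if_neg hle]
        omega

-- when checkRange is false on the whole probed range, the loop returns lastTrue unchanged
theorem calcLoop_all_false (targets drops : List Int) :
    ∀ (k : Nat) (lo hi last : Int), (hi + 1 - lo).toNat ≤ k →
    0 ≤ lo →
    (∀ r, 0 ≤ r → r ≤ hi → checkRange targets drops r = false) →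
    calcLoop targets drops k lo hi last = last := by
  intro k
  induction k with
  | zero =>
      intro lo hi last hk h0 hchar
      rfl
  | succ k ih =>
      intro lo hi last hk h0 hchar
      show (if hi ≥ lo then _ else last) = last
      by_cases hle : hi ≥ lo
      · rw [if_pos hle]
        show (if checkRange targets drops (PySem.Int.floordiv (lo + hi) 2) = true then
            calcLoop targets drops k lo (PySem.Int.floordiv (lo + hi) 2 - 1) (PySem.Int.floordiv (lo + hi) 2)
          else calcLoop targets drops k (PySem.Int.floordiv (lo + hi) 2 + 1) hi last) = last
        have hmid := PySem.Int.floordiv_two_mid_bounds (show lo ≤ hi by omega)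
        set mid := PySem.Int.floordiv (lo + hi) 2 with hmiddef
        rw [hchar mid (by omega) (by omega)]
        simp only [Bool.false_eq_true, if_false]
        exact ih (mid + 1) hi last (by omega) (by omega) hchar
      · rw [if_neg hle]

-- ===== VERDICT (by name: the statement is the Claim_ definition above) =====
theorem calculate_spec : Claim_equal_calculate := by
  intro targets drops _
  unfold Spec_calculate calculate calculate_alt
  by_cases hd : drops = []
  · subst hd
    by_cases ht : targets = []
    · subst ht
      rw [if_neg (by simp)]
      have h0 := calcLoop_finds [] [] 0 100000001 0 100000000 100000000
        (by norm_num) (by omega) (by omega) (by omega) (by omega)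
        (fun r hr => by simp [checkRange, hr])
      rw [h0, needOf_empty]
      omega
    · rw [if_pos ⟨ht, rfl⟩]
      exact calcLoop_all_false targets [] 100000001 0 100000000 100000000
        (by norm_num) (by omega)
        (fun r hr _ => checkRange_empty_drops targets r ht)
  · rw [if_neg (by simp [hd])]
    have hchar := fun r hr => checkRange_char targets drops r hd hr
    have hN0 := needOf_nonneg targets drops
    by_cases hbig : needOf targets drops ≤ 100000000
    · have h1 := calcLoop_finds targets drops (needOf targets drops) 100000001 0 100000000 100000000
        (by norm_num) (by omega) hN0 hbig (by omega) hchar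
      rw [h1]
      omega
    · have h2 := calcLoop_all_false targets drops 100000001 0 100000000 100000000
        (by norm_num) (by omega)
        (fun r hr hrh => by rw [hchar r hr]; simp; omega)
      rw [h2]
      omega
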